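-- pv_equiv track=rewrite | github.com/ijulca/Orthology_analysis | ortho2cat.py | issingle
-- ===== SOURCE A (Python) =====
-- def get_sp2num(genes):
--     species = {}
--     for g in genes:
--         sp = g.split('-')[-1]
--         if sp not in species:
--             species[sp] = 0
--         species[sp] += 1
--     return species
--
-- def issingle(genes, nsp):
--     species = get_sp2num(genes)
--     toprint = False
--     if len(species) >= nsp:
--         i = 0
--         for s in species:
--             if species[s] == 1:
--                 i+=1
--         if i >= nsp:
--             toprint = True
--     return toprint
-- ===== SOURCE B (Python) =====
-- def issingle(genes, nsp):
--     sps = sorted(g.split('-')[-1] for g in genes)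
--     singles = 0
--     run = 0
--     prev = None
--     for s in sps:
--         if prev == s:
--             run += 1
--         else:
--             if run == 1:
--                 singles += 1
--             run = 1
--             prev = s
--     if run == 1:
--         singles += 1
--     return singles >= nsp
-- ===== Notes on version B (the rewrite author's own statement) =====
-- stated objective: alternative
-- what changed: B replaces the frequency dictionary and the redundant distinct-species length check by sorting the species tokens and counting runs of length exactly one in a single scan, returning singles >= nsp (valid since singleton species are pairwise distinct, so singles never exceeds the distinct count).
import Mathlib
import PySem

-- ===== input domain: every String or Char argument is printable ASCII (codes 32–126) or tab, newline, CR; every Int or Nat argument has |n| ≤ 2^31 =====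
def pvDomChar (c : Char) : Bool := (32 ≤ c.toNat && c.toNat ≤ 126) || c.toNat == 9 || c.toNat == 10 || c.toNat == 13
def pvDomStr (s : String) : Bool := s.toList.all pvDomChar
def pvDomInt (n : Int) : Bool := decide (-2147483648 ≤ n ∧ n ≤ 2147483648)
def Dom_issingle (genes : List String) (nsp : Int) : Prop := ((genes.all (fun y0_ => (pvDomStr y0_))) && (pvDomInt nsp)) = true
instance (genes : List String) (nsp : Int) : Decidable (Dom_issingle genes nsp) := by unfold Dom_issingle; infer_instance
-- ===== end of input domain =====

-- B replaces A's frequency dictionary and its redundant distinct-species length check by a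
-- sort-then-scan: it counts runs of length exactly one in the sorted token list (same cost class).

-- ===== PORT A =====
-- g.split('-')[-1], used verbatim by both Pythons; split with a nonempty separator never
-- returns an empty list, so the [-1] index never raises and the .getD defaults are unreachable
def spOf (g : String) : String :=
  (PySem.List.pyGet? ((PySem.Str.split? g "-").getD []) (-1)).getD ""

def get_sp2num (genes : List String) : PySem.Dict String Int :=
  genes.foldl (fun species g =>
    let sp := spOf g
    let species := if species.contains sp then species else species.insert sp 0
    species.insert sp (species.getD sp 0 + 1)) PySem.Dict.empty

def issingle (genes : List String) (nsp : Int) : Bool :=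
  let species := get_sp2num genes
  if (species.size : Int) ≥ nsp then
    let i := species.keys.foldl (fun i s => if species.getD s 0 = 1 then i + 1 else i) (0 : Int)
    decide (i ≥ nsp)
  else false

-- ===== PORT B =====
-- Source B's loop body and final 'if run == 1' step, as named helpers (state = (singles, run, prev))
def bstep (st : Int × Int × Option String) (s : String) : Int × Int × Option String :=
  if st.2.2 == some s then (st.1, st.2.1 + 1, st.2.2)
  else ((if st.2.1 = 1 then st.1 + 1 else st.1), 1, some s)

def bfin (st : Int × Int × Option String) : Int :=
  if st.2.1 = 1 then st.1 + 1 else st.1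

def issingle_alt (genes : List String) (nsp : Int) : Bool :=
  let sps := PySem.List.sorted (genes.map spOf) (fun s => s) false
  let st := sps.foldl bstep (0, 0, none)
  decide (bfin st ≥ nsp)

-- ===== PRECONDITION & SPEC =====
def Spec_issingle (genes : List String) (nsp : Int) (out : Bool) : Prop := out = issingle_alt genes nsp
instance (genes : List String) (nsp : Int) (out : Bool) : Decidable (Spec_issingle genes nsp out) := by unfold Spec_issingle; infer_instance

-- ===== CLAIM (what is proved, stated in full; the proofs are below) =====
def Claim_equal_issingle : Prop := ∀ (genes : List String) (nsp : Int), Dom_issingle genes nsp → Spec_issingle genes nsp (issingle genes nsp)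

-- ===== LEMMAS AND PROOFS =====

-- A's dict loop is Counter over the species tokens
theorem get_sp2num_eq_counter (genes : List String) :
    get_sp2num genes = PySem.Dict.counter (genes.map spOf) := by
  rw [← PySem.Dict.foldl_insert_getD_add_one_eq_counter, List.foldl_map]
  unfold get_sp2num
  congr 1
  funext d g
  by_cases h : d.contains (spOf g)
  · simp [h]
  · have hc : d.contains (spOf g) = false := by simpa using h
    simp only [hc, Bool.false_eq_true, if_false]
    rw [PySem.Dict.getD_insert_self, PySem.Dict.insert_insert_self,
        PySem.Dict.getD_of_not_contains d _ hc]

-- the set of singleton species: counted over the distinct tokens (A) or over all tokens (B),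
-- the result is the same, because a token counted once occurs once
theorem countP_dedup_count_one {α : Type} [BEq α] [LawfulBEq α] [DecidableEq α] (xs : List α) :
    (PySem.Set.ofList xs : List α).countP (fun x => xs.count x = 1) =
    xs.countP (fun x => xs.count x = 1) := by
  rw [List.countP_eq_length_filter, List.countP_eq_length_filter]
  have hn1 : ((PySem.Set.ofList xs : List α).filter (fun x => xs.count x = 1)).Nodup :=
    (PySem.Set.nodup_ofList xs).filter _
  have hn2 : (xs.filter (fun x => xs.count x = 1)).Nodup := by
    rw [List.nodup_iff_count_le_one]
    intro a
    by_cases ha : a ∈ xs.filter (fun x => xs.count x = 1)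
    · have hc : xs.count a = 1 := by simpa using (List.of_mem_filter ha)
      calc (xs.filter (fun x => xs.count x = 1)).count a ≤ xs.count a :=
            List.Sublist.count_le a List.filter_sublist
        _ ≤ 1 := le_of_eq hc
    · simp [List.count_eq_zero_of_not_mem ha]
  rw [← List.toFinset_card_of_nodup hn1, ← List.toFinset_card_of_nodup hn2]
  congr 1
  ext a
  simp [PySem.Set.mem_ofList]


-- equal incoming elements only extend the current run
theorem foldl_bstep_replicate (m : Nat) (a : String) (s j : Int) :
    (List.replicate m a).foldl bstep (s, j, some a) = (s, j + (m : Int), some a) := by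
  induction m generalizing j with
  | zero => simp
  | succ n ih =>
    rw [List.replicate_succ, List.foldl_cons]
    have hstep : bstep (s, j, some a) a = (s, j + 1, some a) := by simp [bstep]
    rw [hstep, ih]
    have : j + 1 + (n : Int) = j + ((n : Nat) + 1 : Nat) := by push_cast; ring
    rw [this]

-- a sorted chain starts with the full run of its head element
theorem chain_decomp (t : List String) (a : String) (h : (a :: t).Pairwise (· ≤ ·)) :
    ∃ k rest, a :: t = List.replicate (k + 1) a ++ rest ∧ a ∉ rest ∧
      rest.Pairwise (· ≤ ·) := by
  induction t with
  | nil => exact ⟨0, [], by simp, by simp, by simp⟩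
  | cons b t' ih =>
    rw [List.pairwise_cons] at h
    by_cases hb : b = a
    · subst hb
      have h' : (b :: t').Pairwise (· ≤ ·) := h.2
      obtain ⟨k, rest, he, hnm, hp⟩ := ih (by
        rw [List.pairwise_cons] at h' ⊢
        exact ⟨fun x hx => h.1 x (List.mem_cons_of_mem b hx), h'.2⟩)
      refine ⟨k + 1, rest, ?_, hnm, hp⟩
      rw [List.replicate_succ, List.cons_append, ← he]
    · refine ⟨0, b :: t', by simp, ?_, h.2⟩
      intro hmem
      rcases List.mem_cons.mp hmem with h1 | h2
      · exact hb h1.symm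
      · rw [List.pairwise_cons] at h
        exact hb (le_antisymm (h.2.1 a h2) (h.1 b (List.mem_cons_self)))

-- splitting off the first run: singleton-count of the whole vs the remainder
theorem countP_replicate_append (k : Nat) (a : String) (rest : List String) (hna : a ∉ rest) :
    (List.replicate (k + 1) a ++ rest).countP
      (fun x => (List.replicate (k + 1) a ++ rest).count x = 1)
    = (if k = 0 then 1 else 0) + rest.countP (fun x => rest.count x = 1) := by
  rw [List.countP_append]
  congr 1
  · rw [List.countP_replicate]
    have hca : (List.replicate (k + 1) a ++ rest).count a = k + 1 := by
      simp [List.count_append, List.count_eq_zero_of_not_mem hna]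
    simp only [hca, decide_eq_true_eq]
    split_ifs <;> omega
  · apply List.countP_congr
    intro x hx
    have hxa : a ≠ x := fun h => hna (h ▸ hx)
    simp [List.count_append, List.count_replicate, hxa]

-- B's scan over a sorted list counts the runs of length exactly one
theorem bfin_foldl_sorted (n : Nat) :
    ∀ (ys : List String), ys.length ≤ n → ys.Pairwise (· ≤ ·) →
    ∀ (s r : Int) (p : Option String), (∀ a ∈ ys, p ≠ some a) →
    bfin (ys.foldl bstep (s, r, p)) =
      s + (if r = 1 then 1 else 0) + (ys.countP (fun x => ys.count x = 1) : Int) := by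
  induction n with
  | zero =>
    intro ys hl _ s r p _
    have : ys = [] := List.eq_nil_of_length_eq_zero (Nat.le_zero.mp hl)
    subst this
    simp only [List.foldl_nil, bfin, List.countP_nil, Nat.cast_zero, add_zero]
    split_ifs <;> omega
  | succ n ih =>
    intro ys hl hp s r p hnp
    match ys, hl, hp, hnp with
    | [], _, _, _ =>
      simp only [List.foldl_nil, bfin, List.countP_nil, Nat.cast_zero, add_zero]
      split_ifs <;> omega
    | a :: t, hl, hp, hnp =>
      obtain ⟨k, rest, he, hna, hpr⟩ := chain_decomp t a hp
      rw [he, List.foldl_append]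
      have hne : (p == some a) = false := by
        cases p with
        | none => rfl
        | some b =>
          have hb : b ≠ a := fun hba => hnp a (List.mem_cons_self) (by rw [hba])
          simp [hb]
      have h1 : (List.replicate (k + 1) a).foldl bstep (s, r, p)
          = ((if r = 1 then s + 1 else s), (k : Int) + 1, some a) := by
        rw [List.replicate_succ, List.foldl_cons]
        have : bstep (s, r, p) a = ((if r = 1 then s + 1 else s), 1, some a) := by
          simp [bstep, hne]
        rw [this, foldl_bstep_replicate]
        have : (1 : Int) + (k : Int) = (k : Int) + 1 := by ring
        rw [this]
      have hlen : rest.length ≤ n := by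
        have h3 := congrArg List.length he
        simp only [List.length_cons, List.length_append, List.length_replicate] at h3 hl
        omega
      have h2 := ih rest hlen hpr (if r = 1 then s + 1 else s) ((k : Int) + 1) (some a)
        (fun b hb hab => hna (by injection hab with h; rw [h]; exact hb))
      rw [h1, h2, countP_replicate_append k a rest hna]
      push_cast
      split_ifs <;> omega

-- ===== VERDICT (by name: the statement is the Claim_ definition above) =====
theorem issingle_spec : Claim_equal_issingle := by
  intro genes nsp _
  unfold Spec_issingle issingle issingle_alt
  rw [get_sp2num_eq_counter]
  set sps := genes.map spOf with hsps
  have hkeys : (PySem.Dict.counter sps).keys = PySem.Set.ofList sps := PySem.Dict.keys_counter sps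
  have hsize : (PySem.Dict.counter sps).size = (PySem.Set.ofList sps : List String).length := by
    rw [← hkeys]
    simp [PySem.Dict.size, PySem.Dict.keys]
  -- A's inner loop counts keys with value 1
  have hA : (PySem.Dict.counter sps).keys.foldl
      (fun i s => if (PySem.Dict.counter sps).getD s 0 = 1 then i + 1 else i) (0 : Int)
      = ((PySem.Set.ofList sps : List String).countP (fun s => sps.count s = 1) : Int) := by
    rw [hkeys]
    have : ∀ s : String, ((PySem.Dict.counter sps).getD s 0 = 1) ↔ (sps.count s = 1) := by
      intro s; rw [PySem.Dict.getD_counter]; exact_mod_cast Int.natCast_inj (m := sps.count s) (n := 1)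
    calc (PySem.Set.ofList sps : List String).foldl
          (fun i s => if (PySem.Dict.counter sps).getD s 0 = 1 then i + 1 else i) (0 : Int)
        = (PySem.Set.ofList sps : List String).foldl
          (fun i s => if sps.count s = 1 then i + 1 else i) (0 : Int) := by
          congr 1; funext i s; simp only [this]
      _ = ((PySem.Set.ofList sps : List String).countP (fun s => sps.count s = 1) : Int) := by
          have := PySem.List.foldl_count_if (fun s => decide (sps.count s = 1))
            (PySem.Set.ofList sps : List String) 0
          simpa using this
  -- B's run scan over the sorted list counts tokens occurring exactly once
  set ys := PySem.List.sorted sps (fun s => s) false with hys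
  have hperm : ys.Perm sps := PySem.List.sorted_perm sps _ false
  have hchain : ys.Pairwise (· ≤ ·) := PySem.List.sorted_pairwise sps (fun s => s)
  have hB : bfin (ys.foldl bstep (0, 0, none))
      = (sps.countP (fun s => sps.count s = 1) : Int) := by
    rw [bfin_foldl_sorted ys.length ys le_rfl hchain 0 0 none (by simp)]
    have h1 : ys.countP (fun x => ys.count x = 1) = sps.countP (fun x => sps.count x = 1) := by
      calc ys.countP (fun x => ys.count x = 1)
          = ys.countP (fun x => sps.count x = 1) := by
            apply List.countP_congr
            intro x _
            simp [hperm.count_eq x]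
        _ = sps.countP (fun x => sps.count x = 1) := hperm.countP_eq _
    rw [h1]
    norm_num
  simp only [hA, hB, ← countP_dedup_count_one sps]
  set c := (PySem.Set.ofList sps : List String).countP (fun s => sps.count s = 1) with hc
  have hle : c ≤ (PySem.Set.ofList sps : List String).length := List.countP_le_length
  by_cases h : (↑(PySem.Dict.counter sps).size : Int) ≥ nsp
  · simp [h]
  · simp only [h, if_false]
    have : ¬ ((c : Int) ≥ nsp) := by
      intro hge
      exact h (le_trans hge (by rw [hsize]; exact_mod_cast hle))
    simp [this]
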